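-- pv_equiv track=rewrite | github.com/reidrac/z80count | z80count/z80count.py | line_length
-- ===== SOURCE A (Python) =====
-- def line_length(line, tab_width):
--     """Calculate the length of a line taking TABs into account.
--
--     :param str line: line of code
--     :param int tab_width: tab width
--
--     :returns: The length of the line
--     :rtype: int
--
--     """
--     length = 0
--     for i in line:
--         if i == "\t":
--             length = ((length + tab_width) // tab_width) * tab_width
--         else:
--             length += 1
--     return length
-- ===== SOURCE B (Python) =====
-- def line_length(line, tab_width):
--     """Calculate the length of a line taking TABs into account."""
--     parts = line.split("\t")
--     length = len(parts[0])
--     for part in parts[1:]: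
--         length = ((length + tab_width) // tab_width) * tab_width + len(part)
--     return length
-- ===== Notes on version B (the rewrite author's own statement) =====
-- stated objective: simpler
-- what changed: B splits the line on the tab character once and adds whole-segment lengths, advancing to the next tab stop per segment, instead of A's per-character loop with a branch on every character.
import Mathlib
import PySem

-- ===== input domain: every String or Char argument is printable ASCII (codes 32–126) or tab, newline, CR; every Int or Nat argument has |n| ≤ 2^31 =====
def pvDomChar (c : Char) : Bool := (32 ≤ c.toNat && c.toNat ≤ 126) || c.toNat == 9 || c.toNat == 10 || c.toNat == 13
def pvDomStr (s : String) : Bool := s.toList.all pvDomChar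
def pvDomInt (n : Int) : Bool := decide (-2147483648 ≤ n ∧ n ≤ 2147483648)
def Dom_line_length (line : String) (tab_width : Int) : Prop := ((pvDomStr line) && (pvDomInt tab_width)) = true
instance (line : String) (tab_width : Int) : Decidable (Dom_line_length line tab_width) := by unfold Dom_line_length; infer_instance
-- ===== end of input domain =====

-- B replaces A's per-character loop by one split on '\t' plus whole-segment length additions (simpler decomposition).

-- ===== PORT A =====
-- literal transliteration: length = 0; for each char, tab -> round up to next tab stop, else +1
def line_length (line : String) (tab_width : Int) : Int :=
  line.toList.foldl
    (fun length i =>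
      if i == '\t' then (PySem.Int.floordiv (length + tab_width) tab_width) * tab_width
      else length + 1) 0

-- ===== PORT B =====
-- Source B: parts = line.split('\t'); length = len(parts[0]); per remaining part advance to tab stop and add len(part).
-- line.split('\t') (single non-empty separator) is ported as List.splitOn '\t' on the characters.
def line_length_alt (line : String) (tab_width : Int) : Int :=
  let parts := line.toList.splitOn '\t'
  let length : Int := (parts.headD []).length
  parts.tail.foldl
    (fun length part =>
      (PySem.Int.floordiv (length + tab_width) tab_width) * tab_width + (part.length : Int))
    length

-- ===== PRECONDITION & SPEC =====
-- Pre_ excludes only the inputs where Python A raises ZeroDivisionError: tab_width = 0 with a tab present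
-- (Python B raises there too).
def Pre_line_length (line : String) (tab_width : Int) : Prop :=
  tab_width ≠ 0 ∨ '\t' ∉ line.toList
instance (line : String) (tab_width : Int) : Decidable (Pre_line_length line tab_width) := by unfold Pre_line_length; infer_instance
def pvWitness_line_length : String × Int := ("ab\tc", 4)
def Spec_line_length (line : String) (tab_width : Int) (out : Int) : Prop := out = line_length_alt line tab_width
instance (line : String) (tab_width : Int) (out : Int) : Decidable (Spec_line_length line tab_width out) := by unfold Spec_line_length; infer_instance

-- ===== CLAIM (what is proved, stated in full; the proofs are below) =====
def Claim_equal_line_length : Prop := ∀ (line : String) (tab_width : Int), Dom_line_length line tab_width → Pre_line_length line tab_width → Spec_line_length line tab_width (line_length line tab_width)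

-- ===== LEMMAS AND PROOFS =====

-- B's tail loop, abstracted over the starting accumulator and the list of remaining parts.
def pvCombine (t : Int) (acc : Int) (parts : List (List Char)) : Int :=
  match parts with
  | [] => acc
  | f :: rest =>
      rest.foldl
        (fun length part =>
          (PySem.Int.floordiv (length + t) t) * t + (part.length : Int))
        (acc + (f.length : Int))

theorem pvFoldA_eq_combine (t : Int) (cs : List Char) (acc : Int) :
    cs.foldl
      (fun length i =>
        if i == '\t' then (PySem.Int.floordiv (length + t) t) * t
        else length + 1) acc
    = pvCombine t acc (cs.splitOn '\t') := by
  induction cs generalizing acc with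
  | nil => simp [pvCombine, List.splitOn_nil]
  | cons x xs ih =>
    rw [List.foldl_cons, List.splitOn, List.splitOnP_cons]
    by_cases hx : x = '\t'
    · simp only [hx, beq_self_eq_true, if_true]
      rw [ih]
      rcases hsp : xs.splitOn '\t' with _ | ⟨f, r⟩
      · exact absurd hsp (List.splitOnP_ne_nil _ _)
      · simp only [List.splitOn] at hsp
        rw [hsp]
        simp only [pvCombine, List.length_nil, Int.natCast_zero, add_zero, List.foldl_cons]
    · have hbx : (x == '\t') = false := by simp [hx]
      simp only [hbx]
      rw [ih]
      rcases hsp : xs.splitOn '\t' with _ | ⟨f, r⟩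
      · exact absurd hsp (List.splitOnP_ne_nil _ _)
      · simp only [List.splitOn] at hsp
        rw [hsp]
        simp only [List.modifyHead, pvCombine]
        congr 1
        push_cast [List.length_cons]
        ring

-- ===== VERDICT (by name: the statement is the Claim_ definition above) =====
theorem line_length_spec : Claim_equal_line_length := by
  intro line t _ _
  unfold Spec_line_length line_length line_length_alt
  rw [pvFoldA_eq_combine]
  rcases h : line.toList.splitOn '\t' with _ | ⟨f, r⟩
  · exact absurd h (List.splitOnP_ne_nil _ _)
  · simp [pvCombine]
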